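-- pv_equiv track=rewrite | github.com/rohan-gupta/MSAI349 | utils.py | update_missing_attributes_with_majority_value
-- ===== SOURCE A (Python) =====
-- def get_all_attributes(dataset):
--   all_attributes = set()
--
--   for d in dataset:
--     for k in d:
--       if k == "Class":
--         continue
--
--       all_attributes.add(k)
--
--   return list(all_attributes)
--
-- def update_missing_attributes_with_majority_value(dataset):
--   attributes = get_all_attributes(dataset)
--
--   for a in attributes:
--     frequencies = {}
--
--     for d in dataset:
--       if d[a] == "?":
--         continue
--
--       if d[a] not in frequencies:
--         frequencies[d[a]] = 0
--
--       frequencies[d[a]] += 1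
--
--     majority_value = max(frequencies, key = frequencies.get)
--
--     for d in dataset:
--       if d[a] == "?":
--         d[a] = majority_value
--
--   return dataset
-- ===== SOURCE B (Python) =====
-- def update_missing_attributes_with_majority_value(dataset):
--   counts = {}
--   for d in dataset:
--     for k, v in d.items():
--       if k == "Class" or v == "?":
--         continue
--       c = counts.setdefault(k, {})
--       c[v] = c.get(v, 0) + 1
--
--   majority = {a: max(c, key=c.get) for a, c in counts.items()}
--
--   for d in dataset:
--     for k, v in d.items():
--       if v == "?" and k != "Class":
--         d[k] = majority[k]
--
--   return dataset
-- ===== Notes on version B (the rewrite author's own statement) =====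
-- stated objective: alternative
-- what changed: A collects the attribute set and then, per attribute, makes one full counting pass and one full replacement pass over the dataset; B makes a single pass over all record items building a nested counts[attr][value] table, computes each attribute's majority once, and does one replacement pass over record items.
import Mathlib
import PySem

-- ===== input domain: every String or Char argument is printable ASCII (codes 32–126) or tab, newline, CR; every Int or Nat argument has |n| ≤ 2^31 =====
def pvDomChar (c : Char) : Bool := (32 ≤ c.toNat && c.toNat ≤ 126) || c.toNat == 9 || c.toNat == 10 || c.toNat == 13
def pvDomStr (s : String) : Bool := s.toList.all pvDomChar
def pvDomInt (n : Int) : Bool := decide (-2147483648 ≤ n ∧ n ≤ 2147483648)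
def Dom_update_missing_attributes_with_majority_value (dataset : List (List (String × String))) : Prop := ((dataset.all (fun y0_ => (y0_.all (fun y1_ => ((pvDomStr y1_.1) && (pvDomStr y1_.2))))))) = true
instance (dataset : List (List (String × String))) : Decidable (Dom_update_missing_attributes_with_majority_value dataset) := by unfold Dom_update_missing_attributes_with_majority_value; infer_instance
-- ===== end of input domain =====

-- B replaces A's per-attribute counting-and-replacement passes over the dataset by a single pass over
-- record items building a nested counts[attr][value] table plus one replacement pass (objective: alternative).
-- Both Pythons mutate the records in place and return the dataset; the equivalence proved here is about the returned value.


-- ===== PORT A =====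
-- get_all_attributes: the set of all record keys except "Class" (a record is a dict = assoc list; its keys are map fst)
def pvGetAllAttributes (dataset : List (List (String × String))) : PySem.Set String :=
  dataset.foldl
    (fun s d => d.foldl (fun s kv => if kv.1 == "Class" then s else PySem.Set.add s kv.1) s)
    PySem.Set.empty

-- 'if d[a] == "?": continue; if d[a] not in frequencies: frequencies[d[a]] = 0; frequencies[d[a]] += 1'
def pvFreqStep (f : PySem.Dict String Int) (v : String) : PySem.Dict String Int :=
  if v == "?" then f
  else
    let f1 := if f.contains v then f else f.insert v 0
    f1.insert v (f1.getD v 0 + 1)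

-- d[a] raises KeyError on a missing key (excluded by Pre_); the port reads "" there.
-- max() on an empty frequencies dict raises ValueError (excluded by Pre_); the port skips the attribute there.
def update_missing_attributes_with_majority_value (dataset : List (List (String × String))) : List (List (String × String)) :=
  let attributes := pvGetAllAttributes dataset
  attributes.foldl
    (fun ds a =>
      let frequencies : PySem.Dict String Int :=
        ds.foldl (fun f d => pvFreqStep f ((PySem.Dict.mk d).getD a "")) PySem.Dict.empty
      match PySem.List.max? frequencies.keys (fun k => frequencies.getD k 0) with
      | none => ds
      | some majority_value =>
          ds.map (fun d =>
            if (PySem.Dict.mk d).getD a "" == "?" then ((PySem.Dict.mk d).insert a majority_value).items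
            else d))
    dataset

-- ===== PORT B =====
-- 'c[v] = c.get(v, 0) + 1'
def pvBump (c : PySem.Dict String Int) (v : String) : PySem.Dict String Int :=
  c.insert v (c.getD v 0 + 1)

-- one item of B's single counting pass: 'if k == "Class" or v == "?": continue; c = counts.setdefault(k, {}); c[v] = c.get(v, 0) + 1'
def pvCountStep (c : PySem.Dict String (PySem.Dict String Int)) (kv : String × String) : PySem.Dict String (PySem.Dict String Int) :=
  if kv.1 == "Class" || kv.2 == "?" then c
  else c.insert kv.1 (pvBump (c.getD kv.1 PySem.Dict.empty) kv.2)

-- 'max(c, key=c.get)'; the sub-dicts built by pvCountStep are never empty, so the "" default is never read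
def pvMajOf (f : PySem.Dict String Int) : String :=
  (PySem.List.max? f.keys (fun k => f.getD k 0)).getD ""

-- 'majority[k]' raises KeyError on a key absent from counts (excluded by Pre_); the port reads "" there
def update_missing_attributes_with_majority_value_alt (dataset : List (List (String × String))) : List (List (String × String)) :=
  let counts : PySem.Dict String (PySem.Dict String Int) :=
    dataset.foldl (fun c d => d.foldl pvCountStep c) PySem.Dict.empty
  let majority : PySem.Dict String String :=
    PySem.Dict.mk (counts.items.map (fun p => (p.1, pvMajOf p.2)))
  dataset.map (fun d =>
    d.map (fun kv =>
      if kv.2 == "?" && !(kv.1 == "Class") then (kv.1, majority.getD kv.1 "") else kv))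

-- ===== PRECONDITION & SPEC =====
-- Pre_ excludes: records with a duplicated key (such an association list does not denote a Python dict, so
-- neither Python ever receives it); datasets where a non-"Class" key is missing from some record (Python A
-- raises KeyError there); and datasets where some non-"Class" key has value "?" in every record (Python A
-- raises ValueError from max() on an empty dict there).
def Pre_update_missing_attributes_with_majority_value (dataset : List (List (String × String))) : Prop :=
  (∀ d ∈ dataset, (d.map Prod.fst).Nodup) ∧
  (∀ d ∈ dataset, ∀ kv ∈ d, kv.1 ≠ "Class" →
    (∀ d' ∈ dataset, kv.1 ∈ d'.map Prod.fst) ∧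
    (∃ d' ∈ dataset, ∃ kv' ∈ d', kv'.1 = kv.1 ∧ kv'.2 ≠ "?"))
instance (dataset : List (List (String × String))) : Decidable (Pre_update_missing_attributes_with_majority_value dataset) := by
  unfold Pre_update_missing_attributes_with_majority_value; infer_instance

def pvWitness_update_missing_attributes_with_majority_value : (List (List (String × String))) :=
  [[("Class", "y"), ("f", "1")], [("f", "?"), ("Class", "n")]]

def Spec_update_missing_attributes_with_majority_value (dataset : List (List (String × String))) (out : List (List (String × String))) : Prop := out = update_missing_attributes_with_majority_value_alt dataset
instance (dataset : List (List (String × String))) (out : List (List (String × String))) : Decidable (Spec_update_missing_attributes_with_majority_value dataset out) := by unfold Spec_update_missing_attributes_with_majority_value; infer_instance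

-- ===== CLAIM (what is proved, stated in full; the proofs are below) =====
def Claim_equal_update_missing_attributes_with_majority_value : Prop := ∀ (dataset : List (List (String × String))), Dom_update_missing_attributes_with_majority_value dataset → Pre_update_missing_attributes_with_majority_value dataset → Spec_update_missing_attributes_with_majority_value dataset (update_missing_attributes_with_majority_value dataset)

-- ===== LEMMAS AND PROOFS =====

-- the value Python's d[a] reads (first binding; "" if the key is absent, which Pre_ rules out)
def pvLook (a : String) (d : List (String × String)) : String := (PySem.Dict.mk d).getD a ""

-- A's frequency table for attribute a over the original dataset
def pvF (dataset : List (List (String × String))) (a : String) : PySem.Dict String Int :=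
  dataset.foldl (fun f d => pvFreqStep f (pvLook a d)) PySem.Dict.empty

-- the majority value both sides assign to attribute a
def pvM (dataset : List (List (String × String))) (a : String) : String :=
  pvMajOf (pvF dataset a)

-- one record after the attributes in S have been processed by A
def pvUpd (M : String → String) (S : List String) (kv : String × String) : String × String :=
  if kv.1 ∈ S ∧ kv.2 = "?" then (kv.1, M kv.1) else kv

theorem pvFreqStep_eq_bump (f : PySem.Dict String Int) (v : String) (hv : v ≠ "?") :
    pvFreqStep f v = pvBump f v := by
  unfold pvFreqStep pvBump
  simp only [beq_iff_eq, if_neg hv]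
  by_cases hc : f.contains v = true
  · simp [hc]
  · simp [hc, PySem.Dict.insert_insert_self, PySem.Dict.getD_insert_self,
      PySem.Dict.getD_of_not_contains f (0:Int) (by simpa using hc)]

theorem inner_mem (d : List (String × String)) (s : PySem.Set String) (x : String) :
    x ∈ d.foldl (fun s kv => if kv.1 == "Class" then s else PySem.Set.add s kv.1) s ↔
      x ∈ s ∨ (x ∈ d.map Prod.fst ∧ x ≠ "Class") := by
  induction d generalizing s with
  | nil => simp
  | cons kv t ih =>
    simp only [List.foldl_cons, ih, List.map_cons, List.mem_cons]
    by_cases h : kv.1 = "Class"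
    · simp [h]
      constructor
      · rintro (hs | hm); · exact Or.inl hs
        · exact Or.inr ⟨Or.inr hm.1, hm.2⟩
      · rintro (hs | ⟨(rfl | hm), hx⟩)
        · exact Or.inl hs
        · simp_all
        · exact Or.inr ⟨hm, hx⟩
    · simp only [beq_iff_eq, if_neg h, PySem.Set.mem_add]
      constructor
      · rintro ((hs | rfl) | hm)
        · exact Or.inl hs
        · exact Or.inr ⟨Or.inl rfl, h⟩
        · exact Or.inr ⟨Or.inr hm.1, hm.2⟩
      · rintro (hs | ⟨(rfl | hm), hx⟩)
        · exact Or.inl (Or.inl hs)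
        · exact Or.inl (Or.inr rfl)
        · exact Or.inr ⟨hm, hx⟩

theorem inner_nodup (d : List (String × String)) (s : PySem.Set String) (h : s.Nodup) :
    (d.foldl (fun s kv => if kv.1 == "Class" then s else PySem.Set.add s kv.1) s).Nodup := by
  induction d generalizing s with
  | nil => exact h
  | cons kv t ih =>
    simp only [List.foldl_cons]
    split
    · exact ih _ h
    · exact ih _ (PySem.Set.nodup_add _ _ h)

theorem mem_getAll (dataset : List (List (String × String))) (a : String) :
    a ∈ pvGetAllAttributes dataset ↔ a ≠ "Class" ∧ ∃ d ∈ dataset, a ∈ d.map Prod.fst := by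
  unfold pvGetAllAttributes
  suffices h : ∀ (s : PySem.Set String),
      a ∈ dataset.foldl (fun s d => d.foldl (fun s kv => if kv.1 == "Class" then s else PySem.Set.add s kv.1) s) s
        ↔ a ∈ s ∨ (a ≠ "Class" ∧ ∃ d ∈ dataset, a ∈ d.map Prod.fst) by
    have := h PySem.Set.empty
    simpa [PySem.Set.empty] using this
  intro s
  induction dataset generalizing s with
  | nil => simp
  | cons d t ih =>
    simp only [List.foldl_cons, ih, inner_mem]
    constructor
    · rintro ((hs | hm) | ⟨hx, d', hd', hm'⟩)
      · exact Or.inl hs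
      · exact Or.inr ⟨hm.2, d, by simp [hm.1]⟩
      · exact Or.inr ⟨hx, d', by simp [hd', hm']⟩
    · rintro (hs | ⟨hx, d', hd', hm'⟩)
      · exact Or.inl (Or.inl hs)
      · rcases List.mem_cons.mp hd' with rfl | hd'
        · exact Or.inl (Or.inr ⟨hm', hx⟩)
        · exact Or.inr ⟨hx, d', hd', hm'⟩

theorem nodup_getAll (dataset : List (List (String × String))) :
    (pvGetAllAttributes dataset).Nodup := by
  unfold pvGetAllAttributes
  suffices h : ∀ (s : PySem.Set String), s.Nodup →
      (dataset.foldl (fun s d => d.foldl (fun s kv => if kv.1 == "Class" then s else PySem.Set.add s kv.1) s) s).Nodup by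
    exact h _ (by simp [PySem.Set.empty])
  intro s hs
  induction dataset generalizing s with
  | nil => exact hs
  | cons d t ih => exact ih _ (inner_nodup d s hs)

theorem pvUpd_keeps_key (M : String → String) (S : List String) (kv : String × String) :
    (pvUpd M S kv).1 = kv.1 := by
  unfold pvUpd; split <;> rfl

theorem pvLook_cons (a : String) (kv : String × String) (t : List (String × String)) :
    pvLook a (kv :: t) = if kv.1 = a then kv.2 else pvLook a t := by
  obtain ⟨k, v⟩ := kv
  unfold pvLook
  rw [PySem.Dict.getD_eq_get?_getD, PySem.Dict.getD_eq_get?_getD, PySem.Dict.get?_mk_cons]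
  by_cases h : k = a <;> simp [h]

theorem pvLook_of_mem (d : List (String × String)) (kv : String × String)
    (hnd : (d.map Prod.fst).Nodup) (hm : kv ∈ d) : pvLook kv.1 d = kv.2 := by
  induction d with
  | nil => simp at hm
  | cons hd t ih =>
    rw [List.map_cons, List.nodup_cons] at hnd
    rcases List.mem_cons.mp hm with rfl | hm'
    · simp [pvLook_cons]
    · rw [pvLook_cons]
      have hne : hd.1 ≠ kv.1 := fun he => hnd.1 (he ▸ List.mem_map_of_mem hm')
      rw [if_neg hne]
      exact ih hnd.2 hm'

theorem pvLook_map (a : String) (d : List (String × String)) (h : (String × String) → (String × String))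
    (hk : ∀ kv, (h kv).1 = kv.1) (ha : ∀ kv, kv.1 = a → h kv = kv) :
    pvLook a (d.map h) = pvLook a d := by
  induction d with
  | nil => rfl
  | cons hd t ih =>
    simp only [List.map_cons, pvLook_cons, hk]
    by_cases he : hd.1 = a
    · rw [if_pos he, if_pos he, ha hd he]
    · rw [if_neg he, if_neg he, ih]

theorem filter_key_eq (d : List (String × String)) (a : String)
    (hnd : (d.map Prod.fst).Nodup) (hmem : a ∈ d.map Prod.fst) :
    d.filter (fun kv => kv.1 = a) = [(a, pvLook a d)] := by
  induction d with
  | nil => simp at hmem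
  | cons hd t ih =>
    rw [List.map_cons, List.nodup_cons] at hnd
    rw [pvLook_cons]
    by_cases he : hd.1 = a
    · subst he
      have hnil : t.filter (fun kv => decide (kv.1 = hd.1)) = [] := by
        rw [List.filter_eq_nil_iff]
        intro kv hkv
        simp only [decide_eq_true_eq]
        intro hk
        exact hnd.1 (by rw [← hk]; exact List.mem_map_of_mem hkv)
      simp [hnil]
    · have hmem' : a ∈ t.map Prod.fst := by
        rcases List.mem_cons.mp hmem with h' | h'
        · exact absurd h'.symm he
        · exact h'
      simp only [List.filter_cons, decide_eq_true_eq, if_neg he]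
      exact ih hnd.2 hmem'

theorem countStep_getD (a : String) (ha : a ≠ "Class")
    (c : PySem.Dict String (PySem.Dict String Int)) (kv : String × String) :
    (pvCountStep c kv).getD a PySem.Dict.empty =
      if kv.1 = a ∧ kv.2 ≠ "?" then pvBump (c.getD a PySem.Dict.empty) kv.2
      else c.getD a PySem.Dict.empty := by
  unfold pvCountStep
  by_cases hskip : (kv.1 == "Class" || kv.2 == "?") = true
  · rw [if_pos hskip, if_neg]
    rintro ⟨hk, hv⟩
    simp only [Bool.or_eq_true, beq_iff_eq, hv, or_false] at hskip
    exact ha (by rw [← hk]; exact hskip)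
  · rw [if_neg hskip, PySem.Dict.getD_insert]
    have h1 : kv.1 ≠ "Class" ∧ kv.2 ≠ "?" := by
      constructor <;> (intro h; exact hskip (by simp [h]))
    by_cases h3 : a = kv.1
    · rw [if_pos h3, if_pos ⟨h3.symm, h1.2⟩, h3]
    · rw [if_neg h3, if_neg (fun hc => h3 hc.1.symm)]

theorem items_fold_getD (a : String) (ha : a ≠ "Class") (d : List (String × String)) :
    ∀ c, (d.foldl pvCountStep c).getD a PySem.Dict.empty =
      ((d.filter (fun kv => kv.1 = a ∧ kv.2 ≠ "?")).map Prod.snd).foldl pvBump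
        (c.getD a PySem.Dict.empty) := by
  induction d with
  | nil => intro c; rfl
  | cons kv t ih =>
    intro c
    rw [List.foldl_cons, ih, countStep_getD a ha, List.filter_cons]
    by_cases h : kv.1 = a ∧ kv.2 ≠ "?"
    · simp [h]
    · simp [h]

theorem record_count (a : String) (ha : a ≠ "Class") (d : List (String × String))
    (hnd : (d.map Prod.fst).Nodup) (hmem : a ∈ d.map Prod.fst)
    (c : PySem.Dict String (PySem.Dict String Int)) :
    (d.foldl pvCountStep c).getD a PySem.Dict.empty =
      pvFreqStep (c.getD a PySem.Dict.empty) (pvLook a d) := by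
  rw [items_fold_getD a ha]
  have hf : d.filter (fun kv => kv.1 = a ∧ kv.2 ≠ "?") =
      (d.filter (fun kv => kv.1 = a)).filter (fun kv => kv.2 ≠ "?") := by
    rw [List.filter_filter]
    apply List.filter_congr
    intro kv _
    by_cases h1 : kv.1 = a <;> by_cases h2 : kv.2 = "?" <;> simp [h1, h2]
  rw [hf, filter_key_eq d a hnd hmem]
  by_cases hv : pvLook a d = "?"
  · simp [hv, pvFreqStep]
  · simp only [List.filter_cons]
    rw [pvFreqStep_eq_bump _ _ hv]
    simp [hv]

theorem counts_getD (dataset : List (List (String × String))) (a : String) (ha : a ≠ "Class")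
    (hnd : ∀ d ∈ dataset, (d.map Prod.fst).Nodup) (hmem : ∀ d ∈ dataset, a ∈ d.map Prod.fst) :
    (dataset.foldl (fun c d => d.foldl pvCountStep c) PySem.Dict.empty).getD a PySem.Dict.empty =
      pvF dataset a := by
  unfold pvF
  suffices h : ∀ (c : PySem.Dict String (PySem.Dict String Int)),
      (dataset.foldl (fun c d => d.foldl pvCountStep c) c).getD a PySem.Dict.empty =
      dataset.foldl (fun f d => pvFreqStep f (pvLook a d)) (c.getD a PySem.Dict.empty) by
    exact h _
  induction dataset with
  | nil => intro c; rfl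
  | cons d t ih =>
    intro c
    rw [List.foldl_cons, List.foldl_cons,
      ih (fun d' hd' => hnd d' (List.mem_cons_of_mem _ hd')) (fun d' hd' => hmem d' (List.mem_cons_of_mem _ hd')),
      record_count a ha d (hnd d (List.mem_cons_self)) (hmem d (List.mem_cons_self))]

theorem counts_nodup_keys (dataset : List (List (String × String))) :
    (dataset.foldl (fun c d => d.foldl pvCountStep c) PySem.Dict.empty).keys.Nodup := by
  suffices h : ∀ (c : PySem.Dict String (PySem.Dict String Int)), c.keys.Nodup →
      (dataset.foldl (fun c d => d.foldl pvCountStep c) c).keys.Nodup by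
    exact h _ (by simp [PySem.Dict.empty, PySem.Dict.keys])
  have hrec : ∀ (d : List (String × String)) (c : PySem.Dict String (PySem.Dict String Int)),
      c.keys.Nodup → (d.foldl pvCountStep c).keys.Nodup := by
    intro d
    induction d with
    | nil => intro c hc; exact hc
    | cons kv t ih =>
      intro c hc
      rw [List.foldl_cons]
      apply ih
      unfold pvCountStep
      split
      · exact hc
      · exact PySem.Dict.nodup_keys_insert _ _ _ hc
  induction dataset with
  | nil => intro c hc; exact hc
  | cons d t ih =>
    intro c hc
    rw [List.foldl_cons]
    exact ih _ (hrec d c hc)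

theorem insert_ne_empty (f : PySem.Dict String Int) (v : String) (x : Int) :
    f.insert v x ≠ PySem.Dict.empty := by
  intro h
  have h1 := PySem.Dict.contains_insert_self f v x
  rw [h] at h1
  simp [PySem.Dict.contains_empty] at h1

theorem pvFreqStep_ne_empty (f : PySem.Dict String Int) (v : String)
    (h : f ≠ PySem.Dict.empty) : pvFreqStep f v ≠ PySem.Dict.empty := by
  unfold pvFreqStep
  split
  · exact h
  · exact insert_ne_empty _ _ _

theorem pvF_ne_empty (dataset : List (List (String × String))) (a : String)
    (hne : ∃ d ∈ dataset, pvLook a d ≠ "?") :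
    pvF dataset a ≠ PySem.Dict.empty := by
  unfold pvF
  obtain ⟨d0, hd0, hv0⟩ := hne
  suffices h : ∀ (f : PySem.Dict String Int),
      (f ≠ PySem.Dict.empty ∨ ∃ d ∈ dataset, pvLook a d ≠ "?") →
      dataset.foldl (fun f d => pvFreqStep f (pvLook a d)) f ≠ PySem.Dict.empty by
    exact h _ (Or.inr ⟨d0, hd0, hv0⟩)
  clear hd0 hv0 d0
  induction dataset with
  | nil =>
    intro f h
    rcases h with h | ⟨d, hd, _⟩
    · exact h
    · simp at hd
  | cons d t ih =>
    intro f h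
    rw [List.foldl_cons]
    rcases h with h | ⟨d', hd', hv'⟩
    · exact ih _ (Or.inl (pvFreqStep_ne_empty _ _ h))
    · rcases List.mem_cons.mp hd' with rfl | hd''
      · by_cases hv : pvLook a d' = "?"
        · exact absurd hv hv'
        · exact ih _ (Or.inl (by rw [pvFreqStep_eq_bump _ _ hv]; exact insert_ne_empty _ _ _))
      · exact ih _ (Or.inr ⟨d', hd'', hv'⟩)

theorem counts_contains (dataset : List (List (String × String))) (a : String) (ha : a ≠ "Class")
    (hnd : ∀ d ∈ dataset, (d.map Prod.fst).Nodup) (hmem : ∀ d ∈ dataset, a ∈ d.map Prod.fst)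
    (hne : ∃ d ∈ dataset, pvLook a d ≠ "?") :
    (dataset.foldl (fun c d => d.foldl pvCountStep c) PySem.Dict.empty).contains a = true := by
  by_contra h
  have h0 : (dataset.foldl (fun c d => d.foldl pvCountStep c) PySem.Dict.empty).getD a PySem.Dict.empty = PySem.Dict.empty :=
    PySem.Dict.getD_of_not_contains _ _ (by simpa using h)
  rw [counts_getD dataset a ha hnd hmem] at h0
  exact pvF_ne_empty dataset a hne h0

theorem majority_getD (l : List (String × PySem.Dict String Int)) (a : String)
    (s : PySem.Dict String Int) (hnd : (l.map Prod.fst).Nodup) (hm : (a, s) ∈ l) :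
    (PySem.Dict.mk (l.map (fun p => (p.1, pvMajOf p.2)))).getD a "" = pvMajOf s := by
  induction l with
  | nil => simp at hm
  | cons p t ih =>
    rw [List.map_cons, List.nodup_cons] at hnd
    rw [List.map_cons, PySem.Dict.getD_eq_get?_getD, PySem.Dict.get?_mk_cons]
    by_cases h : p.1 = a
    · rcases List.mem_cons.mp hm with he | hm'
      · rw [← he]
        simp
      · exact absurd (h ▸ List.mem_map_of_mem (f := Prod.fst) hm') (h ▸ hnd.1)
    · rw [if_neg (by simpa using h), ← PySem.Dict.getD_eq_get?_getD]
      refine ih hnd.2 ?_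
      rcases List.mem_cons.mp hm with he | hm'
      · exact absurd (by rw [← he]) h
      · exact hm'

theorem maxSome (f : PySem.Dict String Int) (hne : f ≠ PySem.Dict.empty) :
    PySem.List.max? f.keys (fun k => f.getD k 0) = some (pvMajOf f) := by
  have hk : f.keys ≠ [] := by
    intro h
    apply hne
    rw [PySem.Dict.ext_iff]
    have h2 : f.items.map Prod.fst = [] := by
      simpa [PySem.Dict.keys] using h
    simpa [PySem.Dict.empty] using List.map_eq_nil_iff.mp h2
  rcases ho : PySem.List.max? f.keys (fun k => f.getD k 0) with _ | m
  · exact absurd ((PySem.List.max?_eq_none_iff _ _).mp ho) hk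
  · rw [pvMajOf, ho]; rfl

theorem attr_fold (dataset : List (List (String × String)))
    (hnd : ∀ d ∈ dataset, (d.map Prod.fst).Nodup) :
    ∀ (L S : List String), L.Nodup → (∀ a ∈ L, a ∉ S) →
    (∀ a ∈ L, a ≠ "Class" ∧ (∀ d ∈ dataset, a ∈ d.map Prod.fst) ∧ (∃ d ∈ dataset, pvLook a d ≠ "?")) →
    L.foldl
      (fun ds a =>
        let frequencies : PySem.Dict String Int :=
          ds.foldl (fun f d => pvFreqStep f ((PySem.Dict.mk d).getD a "")) PySem.Dict.empty
        match PySem.List.max? frequencies.keys (fun k => frequencies.getD k 0) with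
        | none => ds
        | some majority_value =>
            ds.map (fun d =>
              if (PySem.Dict.mk d).getD a "" == "?" then ((PySem.Dict.mk d).insert a majority_value).items
              else d))
      (dataset.map (fun d => d.map (pvUpd (pvM dataset) S))) =
    dataset.map (fun d => d.map (pvUpd (pvM dataset) (S ++ L))) := by
  intro L
  induction L with
  | nil => intro S _ _ _; simp
  | cons a L' ih =>
    intro S hL hS hP
    rw [List.foldl_cons]
    have haS : a ∉ S := hS a List.mem_cons_self
    obtain ⟨haC, hall, hsome⟩ := hP a List.mem_cons_self
    have hfix : ∀ kv : String × String, kv.1 = a → pvUpd (pvM dataset) S kv = kv := by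
      intro kv hk
      unfold pvUpd
      rw [if_neg]
      rintro ⟨h1, _⟩
      exact haS (hk ▸ h1)
    have hfreq :
        (dataset.map (fun d => d.map (pvUpd (pvM dataset) S))).foldl
          (fun f d => pvFreqStep f ((PySem.Dict.mk d).getD a "")) PySem.Dict.empty = pvF dataset a := by
      rw [List.foldl_map]
      unfold pvF
      apply PySem.List.foldl_congr_mem
      intro acc d _
      show pvFreqStep acc (pvLook a (d.map (pvUpd (pvM dataset) S))) = pvFreqStep acc (pvLook a d)
      rw [pvLook_map a d _ (pvUpd_keeps_key _ _) hfix]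
    have hmax := maxSome _ (pvF_ne_empty dataset a hsome)
    have hstep :
        (dataset.map (fun d => d.map (pvUpd (pvM dataset) S))).map
          (fun d =>
            if (PySem.Dict.mk d).getD a "" == "?" then ((PySem.Dict.mk d).insert a (pvMajOf (pvF dataset a))).items
            else d) =
        dataset.map (fun d => d.map (pvUpd (pvM dataset) (S ++ [a]))) := by
      rw [List.map_map]
      apply List.map_congr_left
      intro d hd
      show (if pvLook a (d.map (pvUpd (pvM dataset) S)) == "?"
            then ((PySem.Dict.mk (d.map (pvUpd (pvM dataset) S))).insert a (pvMajOf (pvF dataset a))).items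
            else d.map (pvUpd (pvM dataset) S)) = d.map (pvUpd (pvM dataset) (S ++ [a]))
      rw [pvLook_map a d _ (pvUpd_keeps_key _ _) hfix]
      by_cases hv : pvLook a d = "?"
      · rw [if_pos (by simpa using hv)]
        have hcont : (PySem.Dict.mk (d.map (pvUpd (pvM dataset) S))).contains a = true := by
          rw [PySem.Dict.contains_iff_mem_keys, PySem.Dict.keys_mk, List.map_map]
          have hcomp : (Prod.fst ∘ pvUpd (pvM dataset) S) = Prod.fst := by
            funext kv; exact pvUpd_keeps_key _ _ kv
          rw [hcomp]
          exact hall d hd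
        rw [PySem.Dict.items_insert_of_contains _ _ hcont]
        show (d.map (pvUpd (pvM dataset) S)).map (fun p => if (p.1 == a) = true then (a, pvMajOf (pvF dataset a)) else p) = _
        rw [List.map_map]
        apply List.map_congr_left
        intro kv hkv
        by_cases hk : kv.1 = a
        · have hv2 : kv.2 = "?" := by rw [← pvLook_of_mem d kv (hnd d hd) hkv, hk]; exact hv
          simp only [Function.comp_apply, hfix kv hk, hk, beq_self_eq_true, if_true]
          unfold pvUpd
          rw [if_pos ⟨by simp [hk], hv2⟩, hk]
          rfl
        · simp only [Function.comp_apply]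
          rw [if_neg (by simpa [pvUpd_keeps_key] using hk)]
          unfold pvUpd
          have hiff : (kv.1 ∈ S ++ [a]) ↔ kv.1 ∈ S := by simp [hk]
          by_cases h1 : kv.1 ∈ S ∧ kv.2 = "?"
          · rw [if_pos h1, if_pos ⟨hiff.mpr h1.1, h1.2⟩]
          · rw [if_neg h1, if_neg (fun hc => h1 ⟨hiff.mp hc.1, hc.2⟩)]
      · rw [if_neg (by simpa using hv)]
        apply List.map_congr_left
        intro kv hkv
        unfold pvUpd
        by_cases hk : kv.1 = a
        · have hv2 : kv.2 ≠ "?" := by rw [← pvLook_of_mem d kv (hnd d hd) hkv, hk]; exact hv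
          rw [if_neg (fun hc => hv2 hc.2), if_neg (fun hc => hv2 hc.2)]
        · have hiff : (kv.1 ∈ S ++ [a]) ↔ kv.1 ∈ S := by simp [hk]
          by_cases h1 : kv.1 ∈ S ∧ kv.2 = "?"
          · rw [if_pos h1, if_pos ⟨hiff.mpr h1.1, h1.2⟩]
          · rw [if_neg h1, if_neg (fun hc => h1 ⟨hiff.mp hc.1, hc.2⟩)]
    rw [show S ++ a :: L' = (S ++ [a]) ++ L' by simp]
    rw [← ih (S ++ [a]) (List.nodup_cons.mp hL).2
      (fun a' ha' => by
        simp only [List.mem_append, List.mem_singleton]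
        rintro (h | rfl)
        · exact hS a' (List.mem_cons_of_mem _ ha') h
        · exact (List.nodup_cons.mp hL).1 ha')
      (fun a' ha' => hP a' (List.mem_cons_of_mem _ ha'))]
    congr 1
    simp only [hfreq, hmax]
    exact hstep

-- ===== VERDICT (by name: the statement is the Claim_ definition above) =====
theorem update_missing_attributes_with_majority_value_spec : Claim_equal_update_missing_attributes_with_majority_value := by
  intro dataset _ hpre
  obtain ⟨hnd, hattr⟩ := hpre
  unfold Spec_update_missing_attributes_with_majority_value
  have hprop : ∀ a ∈ pvGetAllAttributes dataset,
      a ≠ "Class" ∧ (∀ d ∈ dataset, a ∈ d.map Prod.fst) ∧ (∃ d ∈ dataset, pvLook a d ≠ "?") := by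
    intro a hmem
    obtain ⟨haC, d, hd, hkd⟩ := (mem_getAll dataset a).mp hmem
    obtain ⟨kv, hkv, rfl⟩ := List.mem_map.mp hkd
    obtain ⟨h1, h2⟩ := hattr d hd kv hkv haC
    refine ⟨haC, h1, ?_⟩
    obtain ⟨d', hd', kv', hkv', hk'1, hk'2⟩ := h2
    exact ⟨d', hd', by rw [← hk'1, pvLook_of_mem d' kv' (hnd d' hd') hkv']; exact hk'2⟩
  -- A's result
  have hid : dataset.map (fun d => d.map (pvUpd (pvM dataset) [])) = dataset := by
    have h1 : ∀ d : List (String × String), d.map (pvUpd (pvM dataset) []) = d := by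
      intro d
      rw [show pvUpd (pvM dataset) [] = id from funext fun kv => by unfold pvUpd; simp, List.map_id]
    simp [h1]
  have hA := attr_fold dataset hnd (pvGetAllAttributes dataset) [] (nodup_getAll dataset)
    (by simp) hprop
  rw [hid, List.nil_append] at hA
  have hA' : update_missing_attributes_with_majority_value dataset =
      dataset.map (fun d => d.map (pvUpd (pvM dataset) (pvGetAllAttributes dataset))) := hA
  -- B's result
  have hB : update_missing_attributes_with_majority_value_alt dataset =
      dataset.map (fun d => d.map (pvUpd (pvM dataset) (pvGetAllAttributes dataset))) := by
    show dataset.map (fun d =>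
        d.map (fun kv =>
          if kv.2 == "?" && !(kv.1 == "Class") then
            (kv.1, (PySem.Dict.mk ((dataset.foldl (fun c d => d.foldl pvCountStep c) PySem.Dict.empty).items.map
              (fun p => (p.1, pvMajOf p.2)))).getD kv.1 "")
          else kv)) = _
    apply List.map_congr_left
    intro d hd
    apply List.map_congr_left
    intro kv hkv
    by_cases hv : kv.2 = "?"
    · by_cases hc : kv.1 = "Class"
      · rw [if_neg (by simp [hc]), pvUpd, if_neg (fun h => by
          have := (mem_getAll dataset kv.1).mp h.1
          exact this.1 hc)]
      · rw [if_pos (by simp [hv, hc])]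
        obtain ⟨hall, hsome⟩ := hattr d hd kv hkv hc
        have hsome' : ∃ d' ∈ dataset, pvLook kv.1 d' ≠ "?" := by
          obtain ⟨d', hd', kv', hkv', hk'1, hk'2⟩ := hsome
          exact ⟨d', hd', by rw [← hk'1, pvLook_of_mem d' kv' (hnd d' hd') hkv']; exact hk'2⟩
        have hcont := counts_contains dataset kv.1 hc hnd hall hsome'
        set counts := dataset.foldl (fun c d => d.foldl pvCountStep c) PySem.Dict.empty with hcounts
        rcases hg : counts.get? kv.1 with _ | s
        · rw [PySem.Dict.contains_eq_isSome_get?, hg] at hcont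
          simp at hcont
        · have hmemit := PySem.Dict.mem_items_of_get?_eq_some counts hg
          have hndk : (counts.items.map Prod.fst).Nodup := by
            have := counts_nodup_keys dataset
            simpa [PySem.Dict.keys, ← hcounts] using this
          rw [majority_getD counts.items kv.1 s hndk hmemit]
          have hs : s = counts.getD kv.1 PySem.Dict.empty := by
            rw [PySem.Dict.getD_eq_get?_getD, hg]
            rfl
          rw [pvUpd, if_pos ⟨(mem_getAll dataset kv.1).mpr ⟨hc, d, hd, List.mem_map_of_mem hkv⟩, hv⟩]
          rw [hs, hcounts, counts_getD dataset kv.1 hc hnd hall]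
          rfl
    · rw [if_neg (by simp [hv]), pvUpd, if_neg (fun h => hv h.2)]
  rw [hA', hB]
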